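-- pv_equiv track=rewrite | github.com/paiml/depyler | examples/hard_prac_sched_deadline.py | dl_schedule
-- ===== SOURCE A (Python) =====
-- def dl_find_earliest(deadlines: list[int], done: list[int], count: int) -> int:
--     """Find index of task with earliest deadline among undone tasks."""
--     best_idx: int = 0 - 1
--     best_dl: int = 2147483647
--     i: int = 0
--     while i < count:
--         d_flag: int = done[i]
--         if d_flag == 0:
--             dl: int = deadlines[i]
--             if dl < best_dl:
--                 best_dl = dl
--                 best_idx = i
--         i = i + 1
--     return best_idx
--
-- def dl_schedule(task_ids: list[int], deadlines: list[int], durations: list[int],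
--                 done: list[int], count: int) -> int:
--     """Schedule all tasks by earliest deadline. Returns count of missed deadlines."""
--     current_time: int = 0
--     missed: int = 0
--     scheduled: int = 0
--     while scheduled < count:
--         idx: int = dl_find_earliest(deadlines, done, count)
--         if idx < 0:
--             scheduled = count
--         else:
--             dur: int = durations[idx]
--             dl: int = deadlines[idx]
--             finish: int = current_time + dur
--             if finish > dl:
--                 missed = missed + 1
--             current_time = finish
--             done[idx] = 1
--             scheduled = scheduled + 1
--     return missed
-- ===== SOURCE B (Python) =====
-- def dl_schedule(task_ids: list[int], deadlines: list[int], durations: list[int],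
--                 done: list[int], count: int) -> int:
--     """Schedule undone tasks in earliest-deadline-first order (stable by index);
--     return how many finish after their deadline.  Marks scheduled tasks done."""
--     order = sorted((deadlines[i], i) for i in range(count) if done[i] == 0)
--     t = 0
--     missed = 0
--     for dl, i in order:
--         t += durations[i]
--         if t > dl:
--             missed += 1
--         done[i] = 1
--     return missed
-- ===== Notes on version B (the rewrite author's own statement) =====
-- stated objective: alternative
-- what changed: Replaces A's repeated O(n) earliest-deadline scans (one per scheduled task) by a single stable sort of the undone tasks by (deadline, index) followed by one simulation pass; Pre_ excludes inputs where A raises IndexError and the corner where an undone task's deadline is at or above 2147483647, A's best-deadline initializer, which A reads as 'no deadline' and silently never schedules while B schedules it as an ordinary deadline (both readings defensible, neither specified).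
-- outside the precondition, e.g. on dl_schedule([1], [2147483647], [2147483648], [0], 1): A returns 0, B returns 1; on dl_schedule([1], [2147483647], [1], [0], 1): A returns 0, B returns 0
import Mathlib
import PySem

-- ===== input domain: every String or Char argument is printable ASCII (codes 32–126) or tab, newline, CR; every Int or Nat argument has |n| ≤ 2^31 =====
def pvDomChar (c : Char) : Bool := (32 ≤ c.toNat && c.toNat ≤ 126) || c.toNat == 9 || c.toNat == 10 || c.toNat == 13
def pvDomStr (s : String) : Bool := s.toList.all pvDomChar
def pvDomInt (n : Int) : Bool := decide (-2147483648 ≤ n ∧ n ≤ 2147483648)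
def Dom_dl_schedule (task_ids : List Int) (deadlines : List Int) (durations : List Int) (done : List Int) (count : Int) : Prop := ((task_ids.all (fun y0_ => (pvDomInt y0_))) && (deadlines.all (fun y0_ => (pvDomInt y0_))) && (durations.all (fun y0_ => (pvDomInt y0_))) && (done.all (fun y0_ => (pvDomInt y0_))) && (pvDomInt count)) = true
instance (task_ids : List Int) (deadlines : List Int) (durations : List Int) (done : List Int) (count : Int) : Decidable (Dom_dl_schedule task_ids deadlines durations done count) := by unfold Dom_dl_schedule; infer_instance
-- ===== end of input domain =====

-- B replaces A's repeated earliest-deadline scans (one per scheduled task) with one stable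
-- sort of the undone tasks by (deadline, index) and a single simulation pass.
-- Both A and B mutate `done` in place in Python (mark scheduled tasks 1); the equivalence
-- proved here is about the RETURN value.

-- ===== PORT A =====
def dl_find_earliest (deadlines : List Int) (done : List Int) (count : Int) : Int :=
  ((PySem.List.pyRange 0 count 1).foldl
    (fun (st : Int × Int) i =>
      if PySem.List.pyGetD done i 1 = 0 then
        if PySem.List.pyGetD deadlines i 2147483647 < st.2
        then (i, PySem.List.pyGetD deadlines i 2147483647) else st
      else st)
    (-1, 2147483647)).1

-- A's while-loop: `scheduled` grows by one per full iteration (early exit returns missed),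
-- so `count.toNat` iterations of fuel are exactly the Python loop.
def dl_schedule_loop (deadlines : List Int) (durations : List Int) (count : Int) :
    Nat → Int → Int → List Int → Int
  | 0, _, missed, _ => missed
  | fuel+1, current_time, missed, done =>
    let idx := dl_find_earliest deadlines done count
    if idx < 0 then missed
    else
      let dur := PySem.List.pyGetD durations idx 0
      let dl := PySem.List.pyGetD deadlines idx 2147483647
      let finish := current_time + dur
      dl_schedule_loop deadlines durations count fuel finish
        (if finish > dl then missed + 1 else missed)
        (PySem.List.pySetD done idx 1)

def dl_schedule (task_ids : List Int) (deadlines : List Int) (durations : List Int) (done : List Int) (count : Int) : Int :=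
  dl_schedule_loop deadlines durations count count.toNat 0 0 done

-- ===== PORT B =====
-- the generator `(deadlines[i], i) for i in range(count) if done[i] == 0`
def dl_elig (deadlines : List Int) (done : List Int) (i : Int) : Option (Int × Int) :=
  if PySem.List.pyGetD done i 1 = 0
  then some (PySem.List.pyGetD deadlines i 2147483647, i) else none

def dl_pairs (deadlines : List Int) (done : List Int) (count : Int) : List (Int × Int) :=
  (PySem.List.pyRange 0 count 1).filterMap (dl_elig deadlines done)

def dl_schedule_alt (task_ids : List Int) (deadlines : List Int) (durations : List Int) (done : List Int) (count : Int) : Int :=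
  ((PySem.List.sorted2 (dl_pairs deadlines done count) Prod.fst Prod.snd).foldl
    (fun (st : Int × Int) p =>
      let t := st.1 + PySem.List.pyGetD durations p.2 0
      (t, if t > p.1 then st.2 + 1 else st.2)) (0, 0)).2

-- ===== PRECONDITION & SPEC =====
-- Pre_ excludes (a) inputs where Python A raises IndexError (count > len(done), or an
-- undone index i < count past the end of deadlines or durations), and (b) the corner where
-- an undone task's deadline is ≥ 2147483647, A's best-deadline initializer: A reads that
-- value as "no deadline" and silently never schedules the task, B schedules it as an
-- ordinary deadline — both readings are defensible on this unspecified sentinel corner.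
def Pre_dl_schedule (task_ids : List Int) (deadlines : List Int) (durations : List Int) (done : List Int) (count : Int) : Prop :=
  count ≤ (done.length : Int) ∧
  (∀ i : Nat, i < count.toNat → done.getD i 1 = 0 →
    i < deadlines.length ∧ i < durations.length ∧ deadlines.getD i 0 < 2147483647)
instance (task_ids : List Int) (deadlines : List Int) (durations : List Int) (done : List Int) (count : Int) : Decidable (Pre_dl_schedule task_ids deadlines durations done count) := by unfold Pre_dl_schedule; infer_instance

def pvWitness_dl_schedule : List Int × List Int × List Int × List Int × Int :=
  ([1, 2, 3], [5, 3, 9], [2, 2, 2], [0, 0, 0], 3)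

def Spec_dl_schedule (task_ids : List Int) (deadlines : List Int) (durations : List Int) (done : List Int) (count : Int) (out : Int) : Prop := out = dl_schedule_alt task_ids deadlines durations done count
instance (task_ids : List Int) (deadlines : List Int) (durations : List Int) (done : List Int) (count : Int) (out : Int) : Decidable (Spec_dl_schedule task_ids deadlines durations done count out) := by unfold Spec_dl_schedule; infer_instance

-- ===== CLAIM (what is proved, stated in full; the proofs are below) =====
def Claim_equal_dl_schedule : Prop := ∀ (task_ids : List Int) (deadlines : List Int) (durations : List Int) (done : List Int) (count : Int), Dom_dl_schedule task_ids deadlines durations done count → Pre_dl_schedule task_ids deadlines durations done count → Spec_dl_schedule task_ids deadlines durations done count (dl_schedule task_ids deadlines durations done count)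

-- ===== LEMMAS AND PROOFS =====

-- the extract-min step the earliest-deadline fold performs, seen on the eligible pairs
def dlMinStep (st p : Int × Int) : Int × Int := if p.1 < st.2 then (p.2, p.1) else st

-- B's simulation step
def dlSimStep (durations : List Int) (st p : Int × Int) : Int × Int :=
  let t := st.1 + PySem.List.pyGetD durations p.2 0
  (t, if t > p.1 then st.2 + 1 else st.2)

-- A's index fold = the same fold over the eligible pairs (done indices never change the state)
theorem fe_fold_pairs (deadlines done : List Int) (L : List Int) :
    ∀ st : Int × Int,
    L.foldl (fun (st : Int × Int) i =>
      if PySem.List.pyGetD done i 1 = 0 then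
        if PySem.List.pyGetD deadlines i 2147483647 < st.2
        then (i, PySem.List.pyGetD deadlines i 2147483647) else st
      else st) st
    = (L.filterMap (dl_elig deadlines done)).foldl dlMinStep st := by
  induction L with
  | nil => intro st; rfl
  | cons i L ih =>
    intro st
    by_cases h0 : PySem.List.pyGetD done i 1 = 0
    · simp only [List.foldl_cons, List.filterMap_cons, dl_elig, h0, if_true, dlMinStep]
      exact ih _
    · simp only [List.foldl_cons, List.filterMap_cons, dl_elig, h0, if_false]
      exact ih _

theorem minStep_stay (P : List (Int × Int)) :
    ∀ st : Int × Int, (∀ p ∈ P, st.2 ≤ p.1) → P.foldl dlMinStep st = st := by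
  induction P with
  | nil => intro st _; rfl
  | cons p P ih =>
    intro st h
    have h1 : ¬ p.1 < st.2 := not_lt.mpr (h p (by simp))
    simp only [List.foldl_cons, dlMinStep, h1, if_false]
    exact ih st (fun q hq => h q (by simp [hq]))

theorem minStep_min (P : List (Int × Int)) (m : Int × Int) :
    ∀ st : Int × Int, m ∈ P → (∀ p ∈ P, toLex m ≤ toLex p) →
    P.Pairwise (fun p q => p.2 < q.2) → m.1 < st.2 →
    P.foldl dlMinStep st = (m.2, m.1) := by
  induction P with
  | nil => intro st hm; simp at hm
  | cons p P ih =>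
    intro st hm hmin hpw hlt
    rcases List.mem_cons.mp hm with h | h
    · subst h
      simp only [List.foldl_cons, dlMinStep, hlt, if_true]
      apply minStep_stay
      intro q hq
      have := hmin q (by simp [hq])
      rw [Prod.Lex.le_iff] at this
      simp only [ofLex_toLex] at this
      omega
    · have hps : p.2 < m.2 := (List.pairwise_cons.mp hpw).1 m h
      have hmp : m.1 < p.1 := by
        have := hmin p (by simp)
        rw [Prod.Lex.le_iff] at this
        simp only [ofLex_toLex] at this
        omega
      simp only [List.foldl_cons, dlMinStep]
      by_cases hc : p.1 < st.2
      · simp only [hc, if_true]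
        exact ih _ h (fun q hq => hmin q (List.mem_cons_of_mem _ hq)) (List.pairwise_cons.mp hpw).2 hmp
      · simp only [hc, if_false]
        exact ih _ h (fun q hq => hmin q (List.mem_cons_of_mem _ hq)) (List.pairwise_cons.mp hpw).2 hlt

theorem mem_dl_pairs (deadlines done : List Int) (count : Int) (p : Int × Int)
    (hp : p ∈ dl_pairs deadlines done count) :
    dl_elig deadlines done p.2 = some p ∧ 0 ≤ p.2 ∧ p.2 < count ∧
    p.1 = PySem.List.pyGetD deadlines p.2 2147483647 ∧
    PySem.List.pyGetD done p.2 1 = 0 := by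
  rcases List.mem_filterMap.mp hp with ⟨i, hi, he⟩
  rcases PySem.List.mem_pyRange_one.mp hi with ⟨h0, hc⟩
  unfold dl_elig at he ⊢
  by_cases h : PySem.List.pyGetD done i 1 = 0
  · rw [if_pos h] at he
    have hp2 : p.2 = i := by cases he; rfl
    have hp1 : p.1 = PySem.List.pyGetD deadlines i 2147483647 := by cases he; rfl
    subst hp2
    refine ⟨by rw [if_pos h, ← he], h0, hc, hp1, h⟩
  · rw [if_neg h] at he; cases he

theorem pairwise_snd_dl_pairs (deadlines done : List Int) (count : Int) :
    (dl_pairs deadlines done count).Pairwise (fun p q => p.2 < q.2) := by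
  unfold dl_pairs
  rw [List.pairwise_filterMap]
  apply (PySem.List.pairwise_lt_pyRange_one 0 count).imp
  intro a b hab p hp q hq
  unfold dl_elig at hp hq
  split at hp
  · cases hp
    split at hq
    · cases hq; exact hab
    · cases hq
  · cases hp

theorem nodup_dl_pairs (deadlines done : List Int) (count : Int) :
    (dl_pairs deadlines done count).Nodup :=
  (pairwise_snd_dl_pairs deadlines done count).imp (fun h => by intro he; subst he; omega)

-- sorted2 with keys fst, snd is sorting by the lexicographic order on the pairs
theorem sorted2_eq_sorted_toLex (xs : List (Int × Int)) :
    PySem.List.sorted2 xs Prod.fst Prod.snd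
      = PySem.List.sorted xs (fun p => toLex p) false := by
  have hb : (fun (a b : Int × Int) =>
        decide (a.1 < b.1) || (!decide (b.1 < a.1) && decide (a.2 < b.2)))
      = fun (a b : Int × Int) => decide (toLex a < toLex b) := by
    funext a b
    by_cases h1 : a.1 < b.1 <;> by_cases h2 : b.1 < a.1 <;> by_cases h3 : a.2 < b.2 <;>
      simp [Prod.Lex.lt_iff, h1, h2, h3] <;> omega
  rw [PySem.List.sorted_eq_foldl_insertBy]
  simp only [PySem.List.sorted2, Bool.false_eq_true, if_false]
  rw [hb]

-- head of the sorted eligible list = the task A's scan selects; its tail = sorting after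
-- that task is marked done (uniqueness of the strictly increasing rearrangement)
theorem sorted_tail (P : List (Int × Int)) (m : Int × Int) (rest : List (Int × Int))
    (hnd : P.Nodup)
    (hS : PySem.List.sorted P (fun p => toLex p) false = m :: rest) :
    PySem.List.sorted (P.erase m) (fun p => toLex p) false = rest := by
  have hperm : (m :: rest).Perm P := by rw [← hS]; exact PySem.List.sorted_perm _ _ _
  have hpwle : (m :: rest).Pairwise (fun a b => (toLex a : Lex (Int × Int)) ≤ toLex b) := by
    rw [← hS]; exact PySem.List.sorted_pairwise _ _
  have hndS : (m :: rest).Nodup := hperm.nodup_iff.mpr hnd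
  have hpwlt : (m :: rest).Pairwise (fun a b => (toLex a : Lex (Int × Int)) < toLex b) := by
    have := hpwle.and hndS
    exact this.imp (fun h => lt_of_le_of_ne h.1 (fun he => h.2 (toLex.injective he)))
  apply PySem.List.sorted_eq_of_perm_of_pairwise_lt
  · have : ((m :: rest).erase m).Perm (P.erase m) := hperm.erase m
    rwa [List.erase_cons_head] at this
  · exact (List.pairwise_cons.mp hpwlt).2

-- marking the selected task done removes exactly its pair from the eligible list
theorem dl_pairs_set (deadlines done : List Int) (count : Int) (m : Int × Int)
    (hm : m ∈ dl_pairs deadlines done count) :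
    dl_pairs deadlines (PySem.List.pySetD done m.2 1) count
      = (dl_pairs deadlines done count).erase m := by
  obtain ⟨helig, h0, hc, _, hdone⟩ := mem_dl_pairs deadlines done count m hm
  have hlen : m.2.toNat < done.length := by
    by_contra h
    have : PySem.List.pyGetD done m.2 1 = 1 := by
      rw [show m.2 = ((m.2.toNat : Nat) : Int) by omega, PySem.List.pyGetD_natCast,
        List.getD_eq_getElem?_getD, List.getElem?_eq_none (by omega)]
      rfl
    omega
  have hset : PySem.List.pySetD done m.2 1 = done.set m.2.toNat 1 := PySem.List.pySetD_of_nonneg done 1 h0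
  have hgetne : ∀ j : Int, 0 ≤ j → j ≠ m.2 →
      PySem.List.pyGetD (PySem.List.pySetD done m.2 1) j 1 = PySem.List.pyGetD done j 1 := by
    intro j hj hne
    rw [hset, show j = ((j.toNat : Nat) : Int) by omega,
      PySem.List.pyGetD_natCast, PySem.List.pyGetD_natCast,
      List.getD_eq_getElem?_getD, List.getD_eq_getElem?_getD,
      List.getElem?_set_ne (by omega)]
  have heligne : ∀ j : Int, 0 ≤ j → j ≠ m.2 →
      dl_elig deadlines (PySem.List.pySetD done m.2 1) j = dl_elig deadlines done j := by
    intro j hj hne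
    unfold dl_elig
    rw [hgetne j hj hne]
  have heligm : dl_elig deadlines (PySem.List.pySetD done m.2 1) m.2 = none := by
    have hget : PySem.List.pyGetD (PySem.List.pySetD done m.2 1) m.2 1 = 1 := by
      rw [hset]
      generalize hn : m.2.toNat = n at hlen
      rw [show m.2 = (n : Int) by omega, PySem.List.pyGetD_natCast,
        List.getD_eq_getElem?_getD, List.getElem?_set_self hlen]
      rfl
    simp [dl_elig, hget]
  have hsplit : PySem.List.pyRange 0 count 1
      = PySem.List.pyRange 0 m.2 1 ++ m.2 :: PySem.List.pyRange (m.2 + 1) count 1 := by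
    rw [PySem.List.pyRange_one_append 0 m.2 count h0 (le_of_lt hc), PySem.List.pyRange_one_cons hc]
  unfold dl_pairs
  rw [hsplit, List.filterMap_append, List.filterMap_append, List.filterMap_cons,
    List.filterMap_cons, heligm, helig]
  rw [List.filterMap_congr (g := dl_elig deadlines done)
    (fun j hj => heligne j (PySem.List.mem_pyRange_one.mp hj).1
      (by have := (PySem.List.mem_pyRange_one.mp hj).2; omega)),
    List.filterMap_congr (g := dl_elig deadlines done) (l := PySem.List.pyRange (m.2+1) count 1)
    (fun j hj => heligne j (by have := (PySem.List.mem_pyRange_one.mp hj).1; omega)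
      (by have := (PySem.List.mem_pyRange_one.mp hj).1; omega))]
  have hnm : m ∉ (PySem.List.pyRange 0 m.2 1).filterMap (dl_elig deadlines done) := by
    intro hmem
    rcases List.mem_filterMap.mp hmem with ⟨i, hi, he⟩
    have : i < m.2 := (PySem.List.mem_pyRange_one.mp hi).2
    unfold dl_elig at he
    split at he
    · cases he; omega
    · cases he
  rw [List.erase_append_right _ hnm, List.erase_cons_head]

-- the main simulation invariant: with enough fuel and every eligible deadline below A's
-- initializer, A's extract-min loop from any state equals B's single pass over the sorted
-- eligible pairs from that state
theorem dl_loop_eq_sim (deadlines durations : List Int) (count : Int) :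
    ∀ (fuel : Nat) (done : List Int) (t missed : Int),
    (dl_pairs deadlines done count).length ≤ fuel →
    (∀ p ∈ dl_pairs deadlines done count, p.1 < 2147483647) →
    dl_schedule_loop deadlines durations count fuel t missed done
      = ((PySem.List.sorted (dl_pairs deadlines done count) (fun p => toLex p) false).foldl
          (dlSimStep durations) (t, missed)).2 := by
  intro fuel
  induction fuel with
  | zero =>
    intro done t missed hlen _
    have hP : dl_pairs deadlines done count = [] := List.eq_nil_of_length_eq_zero (by omega)
    rw [hP]
    rfl
  | succ fuel ih =>
    intro done t missed hlen hbd
    by_cases hP : dl_pairs deadlines done count = []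
    · have hfe : dl_find_earliest deadlines done count = -1 := by
        unfold dl_find_earliest
        rw [fe_fold_pairs deadlines done _ _]
        have : (PySem.List.pyRange 0 count 1).filterMap (dl_elig deadlines done) = [] := hP
        rw [this]
        rfl
      rw [hP]
      simp only [dl_schedule_loop, hfe]
      norm_num
      rfl
    · obtain ⟨m, rest, hS⟩ : ∃ m rest,
          PySem.List.sorted (dl_pairs deadlines done count) (fun p => toLex p) false
            = m :: rest := by
        rcases h : PySem.List.sorted (dl_pairs deadlines done count) (fun p => toLex p) false with
          _ | ⟨m, rest⟩
        · exact absurd ((PySem.List.sorted_eq_nil_iff _ _ _).mp h) hP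
        · exact ⟨m, rest, rfl⟩
      have hmP : m ∈ dl_pairs deadlines done count := by
        have := (PySem.List.sorted_perm (dl_pairs deadlines done count)
          (fun p => toLex p) false).mem_iff (a := m)
        rw [hS] at this
        exact this.mp (by simp)
      obtain ⟨_, h0, hc, hdl, _⟩ := mem_dl_pairs deadlines done count m hmP
      have hM : m.1 < 2147483647 := hbd m hmP
      have hmin : ∀ p ∈ dl_pairs deadlines done count, (toLex m : Lex (Int × Int)) ≤ toLex p :=
        PySem.List.key_head_sorted_le _ _ hS
      have hfe : dl_find_earliest deadlines done count = m.2 := by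
        unfold dl_find_earliest
        rw [fe_fold_pairs deadlines done _ _]
        have : (PySem.List.pyRange 0 count 1).filterMap (dl_elig deadlines done)
            = dl_pairs deadlines done count := rfl
        rw [this, minStep_min _ m _ hmP hmin (pairwise_snd_dl_pairs deadlines done count)
          (by omega)]
      have hrec := ih (PySem.List.pySetD done m.2 1)
        (t + PySem.List.pyGetD durations m.2 0)
        (if t + PySem.List.pyGetD durations m.2 0 > m.1 then missed + 1 else missed)
        (by
          rw [dl_pairs_set deadlines done count m hmP, List.length_erase_of_mem hmP]
          have : 1 ≤ (dl_pairs deadlines done count).length :=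
            List.length_pos_of_ne_nil hP
          omega)
        (by
          rw [dl_pairs_set deadlines done count m hmP]
          intro p hp
          exact hbd p (List.mem_of_mem_erase hp))
      rw [dl_pairs_set deadlines done count m hmP,
        sorted_tail _ m rest (nodup_dl_pairs deadlines done count) hS] at hrec
      simp only [dl_schedule_loop, hfe]
      rw [if_neg (by omega : ¬ m.2 < 0)]
      rw [hS, List.foldl_cons]
      rw [← hdl]
      exact hrec

-- ===== VERDICT (by name: the statement is the Claim_ definition above) =====
theorem dl_schedule_spec : Claim_equal_dl_schedule := by
  intro task_ids deadlines durations done count _ hpre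
  show dl_schedule task_ids deadlines durations done count
    = dl_schedule_alt task_ids deadlines durations done count
  unfold dl_schedule dl_schedule_alt
  rw [sorted2_eq_sorted_toLex]
  rw [dl_loop_eq_sim deadlines durations count count.toNat done 0 0
    (by
      unfold dl_pairs
      calc ((PySem.List.pyRange 0 count 1).filterMap (dl_elig deadlines done)).length
          ≤ (PySem.List.pyRange 0 count 1).length := List.length_filterMap_le _ _
        _ = count.toNat := by rw [PySem.List.length_pyRange_one]; omega)
    (by
      intro p hp
      obtain ⟨_, h0, hc, hdl, hdone⟩ := mem_dl_pairs deadlines done count p hp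
      have h2 : p.2 = ((p.2.toNat : Nat) : Int) := by omega
      rw [h2, PySem.List.pyGetD_natCast] at hdone
      obtain ⟨hld, _, hbd⟩ := hpre.2 p.2.toNat (by omega) hdone
      rw [h2, PySem.List.pyGetD_natCast] at hdl
      rw [List.getD_eq_getElem?_getD, List.getElem?_eq_getElem hld] at hdl hbd
      simpa [hdl] using hbd)]
  rfl
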